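-- pv_equiv track=rewrite | github.com/duyufrank/TVAE | utils.py | select_continous
-- ===== SOURCE A (Python) =====
-- def select_continous(sequence):
--     if len(sequence)<=1:
--         return []
--     else:
--         subseqs = []
--         subseq=[]
--         for i in range(len(sequence)):
--             if len(subseq)==0:
--                 subseq = [sequence[i]]
--             else:
--                 if sequence[i] == subseq[-1]+1:
--                     subseq.append(sequence[i])
--                     if i == len(sequence)-1:
--                         subseqs.append(subseq)
--                 else:
--                     subseqs.append(subseq)
--                     subseq = [sequence[i]]
--
--         return [subseq for subseq in subseqs if len(subseq)>1]
-- ===== SOURCE B (Python) =====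
-- def select_continous(sequence):
--     n = len(sequence)
--     starts = [i for i in range(n) if i == 0 or sequence[i] != sequence[i - 1] + 1]
--     bounds = starts + [n]
--     return [sequence[a:b] for a, b in zip(bounds, bounds[1:]) if b - a > 1]
-- ===== Notes on version B (the rewrite author's own statement) =====
-- stated objective: simpler
-- what changed: Replaces A's stateful run-accumulator loop (subseq/subseqs with a special last-index append) by computing the run-start boundary indices with one comprehension and slicing the sequence between consecutive boundaries.
import Mathlib
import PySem

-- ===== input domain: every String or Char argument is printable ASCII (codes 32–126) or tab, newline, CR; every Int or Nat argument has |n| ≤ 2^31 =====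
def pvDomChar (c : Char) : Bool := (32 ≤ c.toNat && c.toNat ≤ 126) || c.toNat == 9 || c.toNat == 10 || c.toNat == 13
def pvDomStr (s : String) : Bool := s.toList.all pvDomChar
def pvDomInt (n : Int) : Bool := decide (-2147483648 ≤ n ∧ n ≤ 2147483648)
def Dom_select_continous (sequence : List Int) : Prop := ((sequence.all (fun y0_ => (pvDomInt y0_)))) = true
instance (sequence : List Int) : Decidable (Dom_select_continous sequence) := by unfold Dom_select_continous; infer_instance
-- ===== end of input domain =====

-- B replaces A's stateful run-accumulator loop by computing run-start boundary indices and slicing between them (simpler); equal return value on all inputs.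


-- ===== PORT A =====
def select_continous (sequence : List Int) : List (List Int) :=
  if PySem.List.len sequence ≤ 1 then []
  else
    ((PySem.List.pyRange 0 (PySem.List.len sequence) 1).foldl
      (fun (st : List (List Int) × List Int) i =>
        if st.2.length = 0 then
          (st.1, [PySem.List.pyGetD sequence i 0])
        else
          if PySem.List.pyGetD sequence i 0 = PySem.List.pyGetD st.2 (-1) 0 + 1 then
            let subseq := st.2 ++ [PySem.List.pyGetD sequence i 0]
            if i = PySem.List.len sequence - 1 then (st.1 ++ [subseq], subseq)
            else (st.1, subseq)
          else
            (st.1 ++ [st.2], [PySem.List.pyGetD sequence i 0]))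
      ([], [])).1.filter (fun subseq => 1 < subseq.length)

-- ===== PORT B =====
def select_continous_alt (sequence : List Int) : List (List Int) :=
  let n := PySem.List.len sequence
  let starts := (PySem.List.pyRange 0 n 1).filter
    (fun i => i == 0 || !(PySem.List.pyGetD sequence i 0 == PySem.List.pyGetD sequence (i - 1) 0 + 1))
  let bounds := starts ++ [n]
  ((bounds.zip (PySem.List.slice bounds (some 1) none)).filter (fun p => 1 < p.2 - p.1)).map
    (fun p => PySem.List.slice sequence (some p.1) (some p.2))

-- ===== PRECONDITION & SPEC =====
def Spec_select_continous (sequence : List Int) (out : List (List Int)) : Prop := out = select_continous_alt sequence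
instance (sequence : List Int) (out : List (List Int)) : Decidable (Spec_select_continous sequence out) := by unfold Spec_select_continous; infer_instance

-- ===== CLAIM (what is proved, stated in full; the proofs are below) =====
def Claim_equal_select_continous : Prop := ∀ (sequence : List Int), Dom_select_continous sequence → Spec_select_continous sequence (select_continous sequence)

-- ===== LEMMAS AND PROOFS =====

-- common spec: the maximal consecutive(+1) runs of a list
def pvTakeRun (x : Int) : List Int → List Int × List Int
  | [] => ([], [])
  | y :: ys => if y = x + 1 then ((y :: (pvTakeRun y ys).1), (pvTakeRun y ys).2) else ([], y :: ys)

theorem pvTakeRun_snd_length : ∀ (xs : List Int) (x : Int), (pvTakeRun x xs).2.length ≤ xs.length := by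
  intro xs
  induction xs with
  | nil => intro x; simp [pvTakeRun]
  | cons y ys ih =>
    intro x
    by_cases h : y = x + 1 <;> simp [pvTakeRun, h]
    exact le_trans (ih (x+1)) (Nat.le_succ _)

def pvRuns : List Int → List (List Int)
  | [] => []
  | x :: xs => (x :: (pvTakeRun x xs).1) :: pvRuns (pvTakeRun x xs).2
termination_by l => l.length
decreasing_by
  have := pvTakeRun_snd_length xs x
  simp only [List.length_cons]
  omega

-- A-side spec: the loop state machine, index-free
def pvConsume (c : List Int) : List Int → List (List Int) × List Int
  | [] => ([], c)
  | x :: xs =>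
    if x = PySem.List.pyGetD c (-1) 0 + 1 then pvConsume (c ++ [x]) xs
    else ((c :: (pvConsume [x] xs).1), (pvConsume [x] xs).2)

-- the loop body of A, over (index, element) pairs
def pvG (n : Int) (st : List (List Int) × List Int) (p : Int × Int) : List (List Int) × List Int :=
  if st.2.length = 0 then (st.1, [p.2])
  else
    if p.2 = PySem.List.pyGetD st.2 (-1) 0 + 1 then
      let subseq := st.2 ++ [p.2]
      if p.1 = n - 1 then (st.1 ++ [subseq], subseq) else (st.1, subseq)
    else (st.1 ++ [st.2], [p.2])

theorem pvG_invariant : ∀ (xs : List Int) (k n : Int) (D : List (List Int)) (c : List Int),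
    c ≠ [] → k + xs.length = n →
    (PySem.List.enumerate xs k).foldl (pvG n) (D, c) =
      (D ++ (pvConsume c xs).1 ++
        (if xs ≠ [] ∧ 2 ≤ (pvConsume c xs).2.length then [(pvConsume c xs).2] else []),
       (pvConsume c xs).2) := by
  intro xs
  induction xs with
  | nil =>
    intro k n D c hc hk
    simp [PySem.List.enumerate, pvConsume]
  | cons x xs ih =>
    intro k n D c hc hk
    have hclen : ¬ c.length = 0 := by simpa [List.length_eq_zero_iff] using hc
    rw [PySem.List.enumerate_cons, List.foldl_cons]
    by_cases hx : x = PySem.List.pyGetD c (-1) 0 + 1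
    · by_cases hlast : k = n - 1
      · have hxs : xs = [] := by
          have hl : (xs.length : Int) = 0 := by
            simp only [List.length_cons] at hk; push_cast at hk; omega
          have hl2 : xs.length = 0 := by exact_mod_cast hl
          exact List.length_eq_zero_iff.mp hl2
        subst hxs
        have h2 : 2 ≤ (c ++ [x]).length := by
          rcases c with _ | ⟨a, c'⟩
          · exact absurd rfl hc
          · simp
        simp [pvG, hclen, hx, hlast, pvConsume, PySem.List.enumerate, h2]
      · have hxs : xs ≠ [] := by
          intro h; subst h
          simp only [List.length_nil, Int.natCast_zero, List.length_cons] at hk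
          omega
        have step : pvG n (D, c) (k, x) = (D, c ++ [x]) := by
          simp [pvG, hclen, hx, hlast]
        rw [step, ih (k + 1) n D (c ++ [x]) (by simp) (by simp only [List.length_cons] at hk ⊢; push_cast at hk ⊢; omega)]
        simp [pvConsume, hx, hxs]
    · have step : pvG n (D, c) (k, x) = (D ++ [c], [x]) := by
        simp [pvG, hclen, hx]
      rw [step]
      cases xs with
      | nil =>
        simp [PySem.List.enumerate, pvConsume, hx]
      | cons y ys =>
        rw [ih (k + 1) n (D ++ [c]) [x] (by simp) (by simp only [List.length_cons] at hk ⊢; push_cast at hk ⊢; omega)]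
        simp [pvConsume, hx]

theorem pvGetD_singleton_neg_one (y : Int) : PySem.List.pyGetD [y] (-1) 0 = y := by
  simpa using PySem.List.pyGetD_neg_one_append_singleton (xs := ([] : List Int)) (x := y) (d := 0)

theorem pvConsume_eq : ∀ (xs c : List Int), c ≠ [] →
    (pvConsume c xs).1 ++ [(pvConsume c xs).2] =
      (c ++ (pvTakeRun (PySem.List.pyGetD c (-1) 0) xs).1) ::
        pvRuns ((pvTakeRun (PySem.List.pyGetD c (-1) 0) xs).2) := by
  intro xs
  induction xs with
  | nil =>
    intro c hc
    simp [pvConsume, pvTakeRun, pvRuns]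
  | cons y ys ih =>
    intro c hc
    by_cases h : y = PySem.List.pyGetD c (-1) 0 + 1
    · have h1 : pvConsume c (y :: ys) = pvConsume (c ++ [y]) ys := by
        simp [pvConsume, h]
      rw [h1, ih (c ++ [y]) (by simp), PySem.List.pyGetD_neg_one_append_singleton]
      simp [pvTakeRun, h]
    · have h1 : pvConsume c (y :: ys) =
          ((c :: (pvConsume [y] ys).1), (pvConsume [y] ys).2) := by
        simp [pvConsume, h]
      rw [h1]
      simp only [List.cons_append]
      rw [ih [y] (by simp), pvGetD_singleton_neg_one]
      simp [pvTakeRun, h, pvRuns]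

theorem selA_eq_runs (s : List Int) :
    select_continous s = (pvRuns s).filter (fun r => 1 < r.length) := by
  match s with
  | [] => simp [select_continous, pvRuns]
  | [x] => simp [select_continous, pvRuns, pvTakeRun]
  | x :: y :: ys =>
    unfold select_continous
    have hguard : ¬ PySem.List.len (x :: y :: ys) ≤ 1 := by
      simp [PySem.List.len_eq]
    rw [if_neg hguard]
    have hfold :
        (PySem.List.pyRange 0 (PySem.List.len (x :: y :: ys)) 1).foldl
          (fun (st : List (List Int) × List Int) i =>
            if st.2.length = 0 then
              (st.1, [PySem.List.pyGetD (x :: y :: ys) i 0])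
            else
              if PySem.List.pyGetD (x :: y :: ys) i 0 = PySem.List.pyGetD st.2 (-1) 0 + 1 then
                let subseq := st.2 ++ [PySem.List.pyGetD (x :: y :: ys) i 0]
                if i = PySem.List.len (x :: y :: ys) - 1 then (st.1 ++ [subseq], subseq)
                else (st.1, subseq)
              else
                (st.1 ++ [st.2], [PySem.List.pyGetD (x :: y :: ys) i 0]))
          ([], []) =
        (PySem.List.enumerate (x :: y :: ys) 0).foldl (pvG (PySem.List.len (x :: y :: ys))) ([], []) := by
      rw [PySem.List.enumerate_eq_map_pyRange (d := 0), List.foldl_map]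
      rfl
    rw [hfold, PySem.List.enumerate_cons, List.foldl_cons]
    have step0 : pvG (PySem.List.len (x :: y :: ys)) ([], []) (0, x) = ([], [x]) := by
      simp [pvG]
    rw [step0, pvG_invariant (y :: ys) (0 + 1) (PySem.List.len (x :: y :: ys)) [] [x] (by simp)
        (by simp [PySem.List.len_eq]; push_cast; ring)]
    have hrw := pvConsume_eq (y :: ys) [x] (by simp)
    rw [pvGetD_singleton_neg_one] at hrw
    have hruns : pvRuns (x :: y :: ys) =
        (pvConsume [x] (y :: ys)).1 ++ [(pvConsume [x] (y :: ys)).2] := by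
      rw [hrw]
      simp [pvRuns]
    rw [hruns]
    simp only [List.nil_append, List.filter_append]
    by_cases h2 : 2 ≤ (pvConsume [x] (y :: ys)).2.length
    · rw [if_pos ⟨by simp, h2⟩]
    · rw [if_neg (by simp [h2])]
      have hno : ¬ (1 < (pvConsume [x] (y :: ys)).2.length) := by omega
      simp [List.filter_singleton, hno]

-- B-side: Nat-level boundary machinery
def pvStartsN (s : List Int) : List Nat :=
  (List.range s.length).filter (fun i => i == 0 || !(s.getD i 0 == s.getD (i - 1) 0 + 1))

def pvBoundsN (s : List Int) : List Nat := pvStartsN s ++ [s.length]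

def pvSlicesOf (s : List Int) : List (List Int) :=
  ((pvBoundsN s).zip (pvBoundsN s).tail).map (fun p => (s.drop p.1).take (p.2 - p.1))

theorem pvTakeRun_append : ∀ (xs : List Int) (x : Int),
    (pvTakeRun x xs).1 ++ (pvTakeRun x xs).2 = xs := by
  intro xs
  induction xs with
  | nil => intro x; simp [pvTakeRun]
  | cons y ys ih =>
    intro x
    by_cases h : y = x + 1 <;> simp [pvTakeRun, h]
    exact ih (x + 1)

theorem pvRun_chain : ∀ (xs : List Int) (x : Int) (i : Nat),
    i + 1 < (x :: (pvTakeRun x xs).1).length →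
    (x :: (pvTakeRun x xs).1).getD (i + 1) 0 = (x :: (pvTakeRun x xs).1).getD i 0 + 1 := by
  intro xs
  induction xs with
  | nil => intro x i hi; simp [pvTakeRun] at hi
  | cons y ys ih =>
    intro x i hi
    by_cases h : y = x + 1
    · subst h
      simp only [pvTakeRun] at hi ⊢
      match i with
      | 0 => simp
      | j + 1 =>
        have := ih (x + 1) j (by simpa using hi)
        simpa using this
    · simp [pvTakeRun, h] at hi
  
theorem pvRun_break : ∀ (xs : List Int) (x : Int),
    (pvTakeRun x xs).2 ≠ [] →
    (pvTakeRun x xs).2.getD 0 0 ≠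
      (x :: (pvTakeRun x xs).1).getD ((x :: (pvTakeRun x xs).1).length - 1) 0 + 1 := by
  intro xs
  induction xs with
  | nil => intro x h; simp [pvTakeRun] at h
  | cons y ys ih =>
    intro x h
    by_cases hy : y = x + 1
    · subst hy
      simp only [pvTakeRun] at h ⊢
      simpa using ih (x + 1) h
    · simp [pvTakeRun, hy]

theorem pvStartsN_append (r ρ : List Int) (hr : 1 ≤ r.length)
    (hchain : ∀ i, i + 1 < r.length → r.getD (i + 1) 0 = r.getD i 0 + 1)
    (hbreak : ρ ≠ [] → ρ.getD 0 0 ≠ r.getD (r.length - 1) 0 + 1) :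
    pvStartsN (r ++ ρ) = 0 :: (pvStartsN ρ).map (fun i => r.length + i) := by
  unfold pvStartsN
  rw [List.length_append, List.range_add, List.filter_append]
  have part1 : (List.range r.length).filter
      (fun i => i == 0 || !((r ++ ρ).getD i 0 == (r ++ ρ).getD (i - 1) 0 + 1)) = [0] := by
    obtain ⟨mm, hmm⟩ : ∃ mm, r.length = mm + 1 := ⟨r.length - 1, by omega⟩
    rw [hmm, List.range_succ_eq_map]
    rw [List.filter_cons_of_pos (by simp)]
    have hnil : (List.map Nat.succ (List.range mm)).filter
        (fun i => i == 0 || !((r ++ ρ).getD i 0 == (r ++ ρ).getD (i - 1) 0 + 1)) = [] := by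
      rw [List.filter_eq_nil_iff]
      intro a ha
      obtain ⟨j, hj, rfl⟩ := List.mem_map.mp ha
      have hjlt := List.mem_range.mp hj
      have h1 : j.succ < r.length := by omega
      have h2 : j < r.length := by omega
      rw [List.getD_append r ρ 0 j.succ h1]
      have hsd : j.succ - 1 = j := by omega
      rw [hsd, List.getD_append r ρ 0 j h2]
      have hch := hchain j (by omega)
      simp only [List.getD_eq_getElem?_getD] at hch
      simp [hch]
    rw [hnil]
  rw [part1]
  have part2 : (List.map (fun i => r.length + i) (List.range ρ.length)).filter
      (fun i => i == 0 || !((r ++ ρ).getD i 0 == (r ++ ρ).getD (i - 1) 0 + 1)) =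
      ((List.range ρ.length).filter
        (fun i => i == 0 || !(ρ.getD i 0 == ρ.getD (i - 1) 0 + 1))).map (fun i => r.length + i) := by
    rw [List.filter_map]
    congr 1
    apply List.filter_congr
    intro i hi
    have hilt := List.mem_range.mp hi
    simp only [Function.comp_apply]
    match i with
    | 0 =>
      have hρ : ρ ≠ [] := by
        intro h; subst h; simp at hilt
      have hg1 : (r ++ ρ).getD (r.length + 0) 0 = ρ.getD 0 0 := by
        rw [List.getD_append_right r ρ 0 (r.length + 0) (by omega)]
        simp
      have hg2 : (r ++ ρ).getD (r.length + 0 - 1) 0 = r.getD (r.length - 1) 0 := by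
        rw [List.getD_append r ρ 0 (r.length + 0 - 1) (by omega)]
        simp
      have hb := hbreak hρ
      simp only [hg1, hg2]
      have hb' : ¬ (ρ[0]?.getD 0 = r[r.length - 1]?.getD 0 + 1) := by
        simpa [List.getD_eq_getElem?_getD] using hb
      simp [hb']
    | j + 1 =>
      have hg1 : (r ++ ρ).getD (r.length + (j + 1)) 0 = ρ.getD (j + 1) 0 := by
        rw [List.getD_append_right r ρ 0 _ (by omega)]
        congr 1
        omega
      have hg2 : (r ++ ρ).getD (r.length + (j + 1) - 1) 0 = ρ.getD j 0 := by
        rw [List.getD_append_right r ρ 0 _ (by omega)]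
        congr 1
        omega
      simp only [hg1, hg2]
      simp
  rw [part2]
  rfl

theorem pvStartsN_cons (x : Int) (xs : List Int) :
    pvStartsN (x :: xs) =
      0 :: (pvStartsN (pvTakeRun x xs).2).map
        (fun i => (x :: (pvTakeRun x xs).1).length + i) := by
  have hsplit : x :: xs = (x :: (pvTakeRun x xs).1) ++ (pvTakeRun x xs).2 := by
    simp [pvTakeRun_append xs x]
  rw [show pvStartsN (x :: xs) = pvStartsN ((x :: (pvTakeRun x xs).1) ++ (pvTakeRun x xs).2) from by
    rw [← hsplit]]
  exact pvStartsN_append _ _ (by simp) (pvRun_chain xs x) (pvRun_break xs x)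

theorem pvBoundsN_head : ∀ (s : List Int), ∃ u, pvBoundsN s = 0 :: u := by
  intro s
  match s with
  | [] => exact ⟨[], rfl⟩
  | x :: xs =>
    refine ⟨(pvStartsN (pvTakeRun x xs).2).map
        (fun i => (x :: (pvTakeRun x xs).1).length + i) ++ [(x :: xs).length], ?_⟩
    unfold pvBoundsN
    rw [pvStartsN_cons]
    rfl

theorem pvBoundsN_le : ∀ (s : List Int), ∀ b ∈ pvBoundsN s, b ≤ s.length := by
  intro s b hb
  unfold pvBoundsN pvStartsN at hb
  rcases List.mem_append.mp hb with h | h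
  · have := List.mem_range.mp (List.mem_of_mem_filter h)
    omega
  · simp at h; omega

theorem pvSlices_bounded (n : Nat) : ∀ (s : List Int), s.length ≤ n → pvSlicesOf s = pvRuns s := by
  induction n with
  | zero =>
    intro s hs
    have h0 : s = [] := List.length_eq_zero_iff.mp (by omega)
    subst h0
    simp [pvSlicesOf, pvBoundsN, pvStartsN, pvRuns]
  | succ n ih =>
    intro s hs
    match s with
    | [] => simp [pvSlicesOf, pvBoundsN, pvStartsN, pvRuns]
    | x :: xs =>
      have hlen : (pvTakeRun x xs).2.length ≤ n := by
        have h1 := pvTakeRun_snd_length xs x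
        simp only [List.length_cons] at hs
        omega
      have ihr := ih (pvTakeRun x xs).2 hlen
      have happ := pvTakeRun_append xs x
      have hsplit : x :: xs = (x :: (pvTakeRun x xs).1) ++ (pvTakeRun x xs).2 := by
        simp [happ]
      have hslen : (x :: xs).length = (x :: (pvTakeRun x xs).1).length + (pvTakeRun x xs).2.length := by
        conv_lhs => rw [hsplit]
        rw [List.length_append]
      obtain ⟨u, hu⟩ := pvBoundsN_head (pvTakeRun x xs).2
      have hbounds : pvBoundsN (x :: xs) =
          0 :: (pvBoundsN (pvTakeRun x xs).2).map
            (fun i => (x :: (pvTakeRun x xs).1).length + i) := by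
        unfold pvBoundsN
        rw [pvStartsN_cons, List.map_append, hslen]
        rfl
      have hruns : pvRuns (x :: xs) = (x :: (pvTakeRun x xs).1) :: pvRuns (pvTakeRun x xs).2 := by
        rw [pvRuns]
      unfold pvSlicesOf
      rw [hbounds, hu, hruns, List.map_cons, List.tail_cons, List.zip_cons_cons, List.map_cons]
      congr 1
      · -- head slice is the first run
        simp only [Nat.add_zero, List.drop_zero, Nat.sub_zero]
        conv_lhs => rw [hsplit]
        exact List.take_left
      · -- tail slices are the runs of the rest
        have hzip : (((x :: (pvTakeRun x xs).1).length + 0) :: List.map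
              (fun i => (x :: (pvTakeRun x xs).1).length + i) u).zip
            (List.map (fun i => (x :: (pvTakeRun x xs).1).length + i) u) =
            ((0 :: u).zip u).map
              (Prod.map (fun i => (x :: (pvTakeRun x xs).1).length + i)
                        (fun i => (x :: (pvTakeRun x xs).1).length + i)) := by
          simpa using (List.zip_map
            (f := fun i => (x :: (pvTakeRun x xs).1).length + i)
            (g := fun i => (x :: (pvTakeRun x xs).1).length + i)
            (l₁ := 0 :: u) (l₂ := u))
        rw [hzip, List.map_map, ← ihr]
        unfold pvSlicesOf
        rw [hu, List.tail_cons]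
        apply List.map_congr_left
        intro p hp
        obtain ⟨a, b⟩ := p
        simp only [Function.comp_apply, Prod.map_apply]
        conv_lhs => rw [hsplit]
        rw [List.drop_length_add_append]
        congr 1
        omega

theorem pvSlices_eq_runs : ∀ (s : List Int), pvSlicesOf s = pvRuns s := by
  intro s
  exact pvSlices_bounded s.length s le_rfl

theorem pvMapTail {α β : Type} (f : α → β) (l : List α) : (l.map f).tail = l.tail.map f := by
  cases l <;> simp

theorem selB_eq_runs (s : List Int) :
    select_continous_alt s = (pvRuns s).filter (fun r => 1 < r.length) := by
  simp only [select_continous_alt]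
  have hstarts : (PySem.List.pyRange 0 (PySem.List.len s) 1).filter
      (fun i => i == 0 || !(PySem.List.pyGetD s i 0 == PySem.List.pyGetD s (i - 1) 0 + 1)) =
      (pvStartsN s).map (Nat.cast : Nat → Int) := by
    rw [PySem.List.pyRange_one]
    have hlen : ((PySem.List.len s - 0).toNat) = s.length := by
      simp [PySem.List.len_eq]
    rw [hlen]
    have hmap : (List.range s.length).map (fun k : Nat => (0 : Int) + k) =
        (List.range s.length).map (Nat.cast : Nat → Int) := by
      simp
    rw [hmap, List.filter_map]
    unfold pvStartsN
    refine congrArg _ ?_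
    apply List.filter_congr
    intro i hi
    simp only [Function.comp_apply]
    match i with
    | 0 => simp
    | j + 1 =>
      have hz2 : (((j : Nat) : Int) + 1 == 0) = false := by
        rw [beq_eq_false_iff_ne]
        omega
      have hg : PySem.List.pyGetD s (((j : Nat) : Int) + 1) 0 = s.getD (j + 1) 0 := by
        rw [show (((j : Nat) : Int) + 1) = (((j + 1 : Nat)) : Int) from by push_cast; ring,
          PySem.List.pyGetD_natCast]
      simp [hz2, hg, List.getD_eq_getElem?_getD]
  rw [hstarts]
  have hbounds : (pvStartsN s).map (Nat.cast : Nat → Int) ++ [PySem.List.len s] =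
      (pvBoundsN s).map (Nat.cast : Nat → Int) := by
    unfold pvBoundsN
    rw [List.map_append, PySem.List.len_eq]
    rfl
  rw [hbounds, PySem.List.slice_from_one, pvMapTail, List.zip_map, List.filter_map]
  have hfilt : ∀ p ∈ (pvBoundsN s).zip (pvBoundsN s).tail,
      ((fun q : Int × Int => decide (1 < q.2 - q.1)) ∘
        Prod.map (Nat.cast : Nat → Int) (Nat.cast : Nat → Int)) p =
      (fun q : Nat × Nat =>
        decide (1 < ((s.drop q.1).take (q.2 - q.1)).length)) p := by
    intro p hp
    obtain ⟨a, b⟩ := p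
    have hble : b ≤ s.length :=
      pvBoundsN_le s b (List.mem_of_mem_tail (List.of_mem_zip hp).2)
    simp only [Function.comp_apply, Prod.map_apply]
    rw [List.length_take, List.length_drop, decide_eq_decide]
    omega
  rw [List.filter_congr hfilt, List.map_map]
  have hslice : ∀ p ∈ ((pvBoundsN s).zip (pvBoundsN s).tail).filter
      (fun q : Nat × Nat => decide (1 < ((s.drop q.1).take (q.2 - q.1)).length)),
      ((fun q : Int × Int => PySem.List.slice s (some q.1) (some q.2)) ∘
        Prod.map (Nat.cast : Nat → Int) (Nat.cast : Nat → Int)) p =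
      (fun q : Nat × Nat => (s.drop q.1).take (q.2 - q.1)) p := by
    intro p hp
    obtain ⟨a, b⟩ := p
    simp only [Function.comp_apply, Prod.map_apply]
    exact PySem.List.slice_natCast s a b
  rw [List.map_congr_left hslice]
  rw [show (fun q : Nat × Nat => decide (1 < (List.take (q.2 - q.1) (List.drop q.1 s)).length)) =
      ((fun r : List Int => decide (1 < r.length)) ∘
        (fun q : Nat × Nat => List.take (q.2 - q.1) (List.drop q.1 s))) from rfl]
  rw [← List.filter_map]
  have hfin : ((pvBoundsN s).zip (pvBoundsN s).tail).map
      (fun q : Nat × Nat => List.take (q.2 - q.1) (List.drop q.1 s)) = pvRuns s := pvSlices_eq_runs s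
  rw [hfin]

-- ===== VERDICT (by name: the statement is the Claim_ definition above) =====
theorem select_continous_spec : Claim_equal_select_continous := by
  intro s _
  unfold Spec_select_continous
  rw [selA_eq_runs, selB_eq_runs]
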